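-- pv_equiv track=rewrite | github.com/aquarist-labs/aquarium | tools/aquarium-vagrant.py | _parse_vagrant
-- ===== SOURCE A (Python) =====
-- from typing import Any, Dict, List, Optional, Tuple
--
-- def _parse_vagrant(raw: str) -> Dict[str, List[Tuple[str, str]]]:
--
--     result: Dict[str, List[Tuple[str, str]]] = {}
--     lines = raw.splitlines()
--
--     for line in lines:
--         fields = line.split(",")
--         entry: Tuple[str, str] = (fields[1], fields[3])
--         state: str = fields[2]
--         if state not in result:
--             result[state] = []
--         result[state].append(entry)
--
--     return result
-- ===== SOURCE B (Python) =====
-- def _parse_vagrant(raw):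
--     # Two-phase: materialize (state, entry) records, then build each group by a
--     # per-distinct-state scan; key order = first appearance, matching A.
--     recs = [(f[2], (f[1], f[3])) for f in (line.split(",") for line in raw.splitlines())]
--     order = list(dict.fromkeys(s for s, _ in recs))
--     return {s: [e for t, e in recs if t == s] for s in order}
-- ===== Notes on version B (the rewrite author's own statement) =====
-- stated objective: alternative
-- what changed: Replaces A's single-pass incremental dict building with a two-phase decomposition: first materialize a flat list of (state, entry) records, then compute the distinct states in first-appearance order and build each group by filtering the record list.
import Mathlib
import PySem

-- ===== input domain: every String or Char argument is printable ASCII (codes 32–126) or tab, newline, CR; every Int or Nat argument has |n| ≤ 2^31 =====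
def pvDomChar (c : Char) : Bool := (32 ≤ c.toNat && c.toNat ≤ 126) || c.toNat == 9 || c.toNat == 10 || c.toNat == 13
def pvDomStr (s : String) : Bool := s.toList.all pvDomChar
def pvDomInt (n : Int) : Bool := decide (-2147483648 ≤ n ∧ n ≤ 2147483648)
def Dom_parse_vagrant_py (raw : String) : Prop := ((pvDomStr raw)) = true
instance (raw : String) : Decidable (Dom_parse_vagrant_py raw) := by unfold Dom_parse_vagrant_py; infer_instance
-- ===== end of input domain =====

-- B replaces A's incremental dict-building loop by a record list + per-distinct-state grouping scans (objective: alternative decomposition, not faster).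

-- ===== PORT A =====
def parse_vagrant_py (raw : String) : List (String × List (String × String)) :=
  let lines := PySem.Str.splitlines raw
  let result : PySem.Dict String (List (String × String)) :=
    lines.foldl (fun result line =>
      let fields := (PySem.Str.split? line ",").getD []
      let entry : String × String := (PySem.List.pyGetD fields 1 "", PySem.List.pyGetD fields 3 "")
      let state : String := PySem.List.pyGetD fields 2 ""
      let result := if result.contains state then result else result.insert state []
      result.modify state [] (· ++ [entry])
    ) PySem.Dict.empty
  result.items

-- ===== PORT B =====
def parse_vagrant_py_alt (raw : String) : List (String × List (String × String)) :=
  let recs : List (String × (String × String)) :=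
    (PySem.Str.splitlines raw).map (fun line =>
      let f := (PySem.Str.split? line ",").getD []
      (PySem.List.pyGetD f 2 "", (PySem.List.pyGetD f 1 "", PySem.List.pyGetD f 3 "")))
  let order := PySem.List.dedup (recs.map (·.1))
  order.map (fun s => (s, (recs.filter (fun r => r.1 == s)).map (·.2)))

-- ===== PRECONDITION & SPEC =====
-- Pre_ excludes exactly the inputs where Python A raises IndexError: a line with fewer than 4 comma-separated fields.
def Pre_parse_vagrant_py (raw : String) : Prop :=
  ∀ line ∈ PySem.Str.splitlines raw, 4 ≤ ((PySem.Str.split? line ",").getD []).length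
instance (raw : String) : Decidable (Pre_parse_vagrant_py raw) := by unfold Pre_parse_vagrant_py; infer_instance
def pvWitness_parse_vagrant_py : String := "a,b,c,d\ne,f,c,g"

def Spec_parse_vagrant_py (raw : String) (out : List (String × List (String × String))) : Prop := out = parse_vagrant_py_alt raw
instance (raw : String) (out : List (String × List (String × String))) : Decidable (Spec_parse_vagrant_py raw out) := by unfold Spec_parse_vagrant_py; infer_instance

-- ===== CLAIM (what is proved, stated in full; the proofs are below) =====
def Claim_equal_parse_vagrant_py : Prop := ∀ (raw : String), Dom_parse_vagrant_py raw → Pre_parse_vagrant_py raw → Spec_parse_vagrant_py raw (parse_vagrant_py raw)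

-- ===== LEMMAS AND PROOFS =====

-- the record a line contributes: (state, entry)
def pvG (line : String) : String × (String × String) :=
  let f := (PySem.Str.split? line ",").getD []
  (PySem.List.pyGetD f 2 "", (PySem.List.pyGetD f 1 "", PySem.List.pyGetD f 3 ""))

-- A's per-line step (membership test + insert-empty + append) equals one `modify`.
theorem pv_step_eq (d : PySem.Dict String (List (String × String))) (s : String)
    (e : String × String) :
    (if d.contains s then d else d.insert s []).modify s [] (· ++ [e])
      = d.modify s [] (· ++ [e]) := by
  by_cases h : d.contains s
  · simp [h]
  · have h' : d.contains s = false := by simpa using h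
    simp [PySem.Dict.modify, h', PySem.Dict.insert_insert_self,
      PySem.Dict.getD_insert_self, PySem.Dict.getD_of_not_contains d [] h']

theorem pv_A_eq (raw : String) :
    parse_vagrant_py raw =
      (((PySem.Str.splitlines raw).map pvG).foldl
        (fun d p => d.modify p.1 [] (· ++ [p.2])) PySem.Dict.empty).items := by
  show (List.foldl _ PySem.Dict.empty (PySem.Str.splitlines raw)).items = _
  rw [List.foldl_map]
  congr 1
  congr 1
  funext d line
  simpa only [pvG] using pv_step_eq d
    (PySem.List.pyGetD ((PySem.Str.split? line ",").getD []) 2 "")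
    (PySem.List.pyGetD ((PySem.Str.split? line ",").getD []) 1 "",
      PySem.List.pyGetD ((PySem.Str.split? line ",").getD []) 3 "")

theorem pv_ports_eq (raw : String) : parse_vagrant_py raw = parse_vagrant_py_alt raw := by
  have hB : parse_vagrant_py_alt raw =
      (PySem.List.dedup (((PySem.Str.splitlines raw).map pvG).map (·.1))).map
        (fun s => (s, ((((PySem.Str.splitlines raw).map pvG).filter (fun r => r.1 == s)).map (·.2)))) := rfl
  rw [pv_A_eq raw, hB]
  set recs : List (String × (String × String)) := (PySem.Str.splitlines raw).map pvG with hrecs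
  set d := recs.foldl (fun d p => d.modify p.1 [] (· ++ [p.2])) PySem.Dict.empty with hd
  have hkeys : d.keys = PySem.List.dedup (recs.map (·.1)) := by
    rw [hd, PySem.Dict.keys_foldl_modify_key]
    simp [PySem.Set.update_nil_left, PySem.Dict.keys_empty]
  have hnd : d.keys.Nodup := by
    rw [hkeys]; simpa using PySem.Set.nodup_ofList (recs.map (·.1))
  have hget : ∀ s, d.getD s [] = (recs.filter (fun r => r.1 == s)).map (·.2) := by
    intro s
    rw [hd, PySem.Dict.getD_foldl_modify_append]
    simp [PySem.Dict.getD_empty]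
  rw [PySem.Dict.items_eq_map_keys d hnd [], hkeys]
  exact List.map_congr_left (fun s _ => by rw [hget s])

-- ===== VERDICT (by name: the statement is the Claim_ definition above) =====
theorem parse_vagrant_py_spec : Claim_equal_parse_vagrant_py := by
  intro raw _ _
  unfold Spec_parse_vagrant_py
  exact pv_ports_eq raw
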